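-- pv_equiv track=rewrite | github.com/pavelb/project-euler-python | 290_0.py | ndtst
-- ===== SOURCE A (Python) =====
-- def ndtst(digits, digitsum, first=True):
-- 	if not (0 <= digitsum <= 9 * digits): return
-- 	if digits == 1:
-- 		yield digitsum
-- 	else:
-- 		m = 10 ** (digits - 1)
-- 		for d in (range(1, 10) if first else range(10)):
-- 			for n in ndtst(digits - 1, digitsum - d, False):
-- 				yield d * m + n
-- ===== SOURCE B (Python) =====
-- def _row(ds, lo, rows, pow10, s):
--     # collect d*pow10 + n for each candidate digit d and each n in the table row
--     # for digit sum s-d (rows[i] holds the values of digit sum lo+i)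
--     row = []
--     for d in ds:
--         i = s - d - lo
--         if 0 <= i < len(rows):
--             row += [d * pow10 + n for n in rows[i]]
--     return row
--
--
-- def ndtst(digits, digitsum, first=True):
--     # Bottom-up dynamic programming instead of A's top-down recursion: for
--     # k = 1 .. digits-1 tabulate, for every reachable digit sum s, the increasing
--     # list of k-digit values (leading zeros allowed) with digit sum s, then attach
--     # the leading digit (1..9 when first, else 0..9).  Only sums in the window
--     # [digitsum - 9*(digits-k), digitsum] can contribute, so the table is windowed.
--     if not (0 <= digitsum <= 9 * digits):
--         return
--     if digits == 1:
--         yield digitsum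
--         return
--     if digits < 1:
--         return
--     lo = max(0, digitsum - 9 * (digits - 1))
--     rows = [[s] for s in range(lo, min(9, digitsum) + 1)]
--     pow10 = 1
--     for k in range(2, digits):
--         pow10 *= 10
--         nlo = max(0, digitsum - 9 * (digits - k))
--         rows = [_row(range(10), lo, rows, pow10, s)
--                 for s in range(nlo, min(9 * k, digitsum) + 1)]
--         lo = nlo
--     yield from _row(range(1, 10) if first else range(10), lo, rows, pow10 * 10, digitsum)
-- ===== Notes on version B (the rewrite author's own statement) =====
-- stated objective: alternative
-- what changed: Replaces A's top-down recursive generator by bottom-up dynamic programming: it tabulates, level by level and only over the window of reachable digit sums, the list of k-digit values for every digit sum, then attaches the leading digit.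
import Mathlib
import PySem

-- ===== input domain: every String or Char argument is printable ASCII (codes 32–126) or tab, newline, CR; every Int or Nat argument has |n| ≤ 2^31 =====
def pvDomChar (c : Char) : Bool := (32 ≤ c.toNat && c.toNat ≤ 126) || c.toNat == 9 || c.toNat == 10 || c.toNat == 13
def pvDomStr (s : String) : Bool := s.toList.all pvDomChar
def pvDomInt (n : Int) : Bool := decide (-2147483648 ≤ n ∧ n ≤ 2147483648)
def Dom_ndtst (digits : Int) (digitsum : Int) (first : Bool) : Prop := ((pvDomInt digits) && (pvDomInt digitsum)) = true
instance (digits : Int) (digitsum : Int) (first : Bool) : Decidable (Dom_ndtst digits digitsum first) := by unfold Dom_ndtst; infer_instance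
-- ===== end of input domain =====

-- B replaces A's top-down recursion by bottom-up dynamic-programming tabulation of the
-- digit-sum lists level by level (objective: alternative algorithm, same output order).
-- Both Pythons are generators; the ports return the list of yielded values.

-- ===== PORT A =====
-- Python's 10 ** (digits - 1) is the float 0.1 when digits = 0, but there it only
-- multiplies into an empty inner enumeration, so no yielded value depends on it;
-- the port writes 10 ^ (digits - 1).toNat, identical wherever a value is produced.
def ndtst (digits : Int) (digitsum : Int) (first : Bool) : List Int :=
  if _h : ¬ (0 ≤ digitsum ∧ digitsum ≤ 9 * digits) then []
  else if digits = 1 then [digitsum]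
  else
    (if first then PySem.List.pyRange 1 10 1 else PySem.List.pyRange 0 10 1).flatMap
      (fun d => (ndtst (digits - 1) (digitsum - d) false).map
        (fun n => d * 10 ^ (digits - 1).toNat + n))
termination_by (digits + 1).toNat
decreasing_by
  rw [not_not] at _h
  omega

-- ===== PORT B =====
-- port of Source B's helper _row
def ndtstAltRow (ds : List Int) (lo : Int) (rows : List (List Int)) (pow10 : Int) (s : Int) : List Int :=
  ds.foldl (fun row d =>
    if 0 ≤ s - d - lo ∧ s - d - lo < (rows.length : Int) then
      row ++ (rows.getD (s - d - lo).toNat []).map (fun n => d * pow10 + n)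
    else row) []

-- one iteration of Source B's 'for k in range(2, digits)' loop, state = (lo, rows, pow10)
def ndtstAltStep (digits digitsum : Int) (st : Int × List (List Int) × Int) (k : Int) :
    Int × List (List Int) × Int :=
  (max 0 (digitsum - 9 * (digits - k)),
   (PySem.List.pyRange (max 0 (digitsum - 9 * (digits - k))) (min (9 * k) digitsum + 1) 1).map
     (fun s => ndtstAltRow (PySem.List.pyRange 0 10 1) st.1 st.2.1 (st.2.2 * 10) s),
   st.2.2 * 10)

def ndtst_alt (digits : Int) (digitsum : Int) (first : Bool) : List Int :=
  if ¬ (0 ≤ digitsum ∧ digitsum ≤ 9 * digits) then []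
  else if digits = 1 then [digitsum]
  else if digits < 1 then []
  else
    let st := (PySem.List.pyRange 2 digits 1).foldl (ndtstAltStep digits digitsum)
      (max 0 (digitsum - 9 * (digits - 1)),
       (PySem.List.pyRange (max 0 (digitsum - 9 * (digits - 1))) (min 9 digitsum + 1) 1).map
         (fun s => [s]),
       1)
    ndtstAltRow (if first then PySem.List.pyRange 1 10 1 else PySem.List.pyRange 0 10 1)
      st.1 st.2.1 (st.2.2 * 10) digitsum

-- ===== PRECONDITION & SPEC =====
def Spec_ndtst (digits : Int) (digitsum : Int) (first : Bool) (out : List Int) : Prop := out = ndtst_alt digits digitsum first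
instance (digits : Int) (digitsum : Int) (first : Bool) (out : List Int) : Decidable (Spec_ndtst digits digitsum first out) := by unfold Spec_ndtst; infer_instance

-- ===== CLAIM (what is proved, stated in full; the proofs are below) =====
def Claim_equal_ndtst : Prop := ∀ (digits : Int) (digitsum : Int) (first : Bool), Dom_ndtst digits digitsum first → Spec_ndtst digits digitsum first (ndtst digits digitsum first)

-- ===== LEMMAS AND PROOFS =====

lemma ndtst_out_of_range (digits digitsum : Int) (first : Bool)
    (h : ¬ (0 ≤ digitsum ∧ digitsum ≤ 9 * digits)) : ndtst digits digitsum first = [] := by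
  rw [ndtst]
  simp [h]

lemma ndtst_nonpos (digits digitsum : Int) (first : Bool) (h : digits ≤ 0) :
    ndtst digits digitsum first = [] := by
  rw [ndtst]
  by_cases hg : 0 ≤ digitsum ∧ digitsum ≤ 9 * digits
  · have h1 : digits ≠ 1 := by omega
    rw [dif_neg (not_not_intro hg), if_neg h1]
    rw [List.flatMap_eq_nil_iff]
    intro d _
    rw [ndtst_out_of_range _ _ _ (by omega)]
    simp
  · simp [hg]

lemma ndtst_unfold_flat (digits digitsum : Int) (first : Bool)
    (hg : 0 ≤ digitsum ∧ digitsum ≤ 9 * digits) (h1 : digits ≠ 1) :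
    ndtst digits digitsum first
      = (if first then PySem.List.pyRange 1 10 1 else PySem.List.pyRange 0 10 1).flatMap
          (fun d => (ndtst (digits - 1) (digitsum - d) false).map
            (fun n => d * 10 ^ (digits - 1).toNat + n)) := by
  rw [ndtst]
  simp [hg, h1]

-- the windowed row computation, described through A: outside-the-window sums contribute nothing
lemma ndtstAltRow_flat (ds : List Int) (k s lo hi' pow10 : Int)
    (hnil : ∀ d ∈ ds, (s - d < lo ∨ hi' ≤ s - d) → ndtst k (s - d) false = []) :
    ndtstAltRow ds lo ((PySem.List.pyRange lo hi' 1).map (fun r => ndtst k r false)) pow10 s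
      = ds.flatMap (fun d => (ndtst k (s - d) false).map (fun n => d * pow10 + n)) := by
  unfold ndtstAltRow
  rw [PySem.List.foldl_congr_mem
    (g := fun row d => row ++ (ndtst k (s - d) false).map (fun n => d * pow10 + n))]
  · exact PySem.List.foldl_append_eq_flatMap _ _ _
  · intro acc d hd
    simp only [List.length_map, PySem.List.length_pyRange_one]
    by_cases hc : 0 ≤ s - d - lo ∧ s - d - lo < (((hi' - lo).toNat : Nat) : Int)
    · rw [if_pos hc]
      rw [← PySem.List.pyGetD_of_nonneg _ _ hc.1]
      rw [show s - d - lo = (((s - d - lo).toNat : Nat) : Int) by omega]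
      rw [PySem.List.pyGetD_map_pyRange_one _ _ _ _ _ (by omega)]
      rw [show lo + (((s - d - lo).toNat : Nat) : Int) = s - d by omega]
    · rw [if_neg hc]
      rw [hnil d hd (by omega)]
      simp

lemma ndtst_fold_inv (digits digitsum : Int) (hg : 0 ≤ digitsum ∧ digitsum ≤ 9 * digits)
    (m : Int) (hm : 2 ≤ m) :
    m ≤ digits →
    (PySem.List.pyRange 2 m 1).foldl (ndtstAltStep digits digitsum)
        (max 0 (digitsum - 9 * (digits - 1)),
         (PySem.List.pyRange (max 0 (digitsum - 9 * (digits - 1))) (min 9 digitsum + 1) 1).map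
           (fun s => [s]),
         1)
      = (max 0 (digitsum - 9 * (digits - (m - 1))),
         (PySem.List.pyRange (max 0 (digitsum - 9 * (digits - (m - 1))))
             (min (9 * (m - 1)) digitsum + 1) 1).map (fun s => ndtst (m - 1) s false),
         10 ^ (m - 2).toNat) := by
  induction m, hm using Int.le_induction with
  | base =>
      intro _
      rw [show PySem.List.pyRange 2 2 1 = [] from PySem.List.pyRange_one_eq_nil (by omega)]
      simp only [List.foldl_nil]
      rw [show (2 : Int) - 1 = 1 by norm_num, show (2 : Int) - 2 = 0 by norm_num]
      rw [show (9 : Int) * 1 = 9 by norm_num]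
      refine Prod.ext rfl (Prod.ext ?_ (by norm_num))
      show List.map _ _ = List.map _ _
      apply List.map_congr_left
      intro s hs
      rw [PySem.List.mem_pyRange_one] at hs
      rw [ndtst, dif_neg (not_not_intro ⟨by omega, by omega⟩), if_pos rfl]
  | succ n hn ih =>
      intro hle
      rw [show PySem.List.pyRange 2 (n + 1) 1 = PySem.List.pyRange 2 n 1 ++ [n] from
            PySem.List.pyRange_one_succ_right (by omega),
          List.foldl_append, ih (by omega)]
      simp only [List.foldl_cons, List.foldl_nil]
      unfold ndtstAltStep
      dsimp only
      have hpow : (10 : Int) ^ (n - 2).toNat * 10 = 10 ^ (n - 1).toNat := by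
        rw [show (n - 1).toNat = (n - 2).toNat + 1 by omega, pow_succ]
      rw [show n + 1 - 1 = n by ring, show n + 1 - 2 = n - 1 by ring, hpow]
      refine Prod.ext rfl (Prod.ext ?_ rfl)
      show List.map _ _ = List.map _ _
      apply List.map_congr_left
      intro s hs
      rw [PySem.List.mem_pyRange_one] at hs
      rw [ndtstAltRow_flat _ (n - 1) s _ _ _ ?_]
      · rw [ndtst_unfold_flat n s false (by omega) (by omega)]
        simp
      · intro d hd hc
        rw [PySem.List.mem_pyRange_one] at hd
        exact ndtst_out_of_range _ _ _ (by omega)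

-- ===== VERDICT (by name: the statement is the Claim_ definition above) =====
theorem ndtst_spec : Claim_equal_ndtst := by
  intro digits digitsum first _
  unfold Spec_ndtst ndtst_alt
  by_cases hg : 0 ≤ digitsum ∧ digitsum ≤ 9 * digits
  · by_cases h1 : digits = 1
    · subst h1
      rw [ndtst]
      simp [hg]
    · by_cases h0 : digits < 1
      · rw [ndtst_nonpos digits digitsum first (by omega)]
        simp [hg, h1, h0]
      · have h2 : 2 ≤ digits := by omega
        rw [if_neg (not_not_intro hg), if_neg h1, if_neg h0]
        rw [ndtst_fold_inv digits digitsum hg digits h2 le_rfl]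
        dsimp only
        have hpow : (10 : Int) ^ (digits - 2).toNat * 10 = 10 ^ (digits - 1).toNat := by
          rw [show (digits - 1).toNat = (digits - 2).toNat + 1 by omega, pow_succ]
        rw [show digits - (digits - 1) = 1 by ring, hpow]
        rw [ndtstAltRow_flat _ (digits - 1) digitsum _ _ _ ?_]
        · rw [ndtst_unfold_flat digits digitsum first hg h1]
        · intro d hd hc
          have hd' : 0 ≤ d ∧ d < 10 := by
            cases first with
            | false => simpa [PySem.List.mem_pyRange_one] using hd
            | true =>
                rw [if_pos rfl, PySem.List.mem_pyRange_one] at hd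
                omega
          exact ndtst_out_of_range _ _ _ (by omega)
  · rw [ndtst_out_of_range digits digitsum first hg]
    rw [if_pos hg]
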